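-- pv_equiv track=rewrite | github.com/zackseyun/cartha-translation | tools/ethiopic/run_parallel_ocr.py | pages_to_spec
-- ===== SOURCE A (Python) =====
-- def pages_to_spec(pages: list[int]) -> str:
--     if not pages:
--         return ""
--     ranges: list[str] = []
--     start = prev = pages[0]
--     for page in pages[1:]:
--         if page == prev + 1:
--             prev = page
--             continue
--         ranges.append(f"{start}-{prev}" if start != prev else str(start))
--         start = prev = page
--     ranges.append(f"{start}-{prev}" if start != prev else str(start))
--     return ",".join(ranges)
-- ===== SOURCE B (Python) =====
-- def pages_to_spec(pages: list[int]) -> str: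
--     parts: list[str] = []
--     i, n = 0, len(pages)
--     while i < n:
--         j = i
--         while j + 1 < n and pages[j + 1] == pages[j] + 1:
--             j += 1
--         lo, hi = pages[i], pages[j]
--         parts.append(str(lo) if lo == hi else f"{lo}-{hi}")
--         i = j + 1
--     return ",".join(parts)
-- ===== Notes on version B (the rewrite author's own statement) =====
-- stated objective: alternative
-- what changed: Replaces A's single-pass state machine (start/prev accumulator with a trailing flush after the loop) by a two-pointer scan that extracts each maximal consecutive run by index and formats it immediately, with no leftover-state flush.
import Mathlib
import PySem

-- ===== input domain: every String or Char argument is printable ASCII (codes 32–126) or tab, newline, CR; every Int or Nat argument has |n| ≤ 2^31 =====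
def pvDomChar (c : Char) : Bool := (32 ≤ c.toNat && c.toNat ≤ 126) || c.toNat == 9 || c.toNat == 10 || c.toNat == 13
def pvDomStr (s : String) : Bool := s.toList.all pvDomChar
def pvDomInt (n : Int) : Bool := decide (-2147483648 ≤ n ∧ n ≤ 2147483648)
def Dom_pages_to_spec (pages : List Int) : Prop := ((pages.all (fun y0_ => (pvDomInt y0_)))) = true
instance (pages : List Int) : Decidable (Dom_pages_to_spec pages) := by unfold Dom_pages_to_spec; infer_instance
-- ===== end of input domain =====

-- B replaces A's state-machine fold (with a trailing flush) by a two-pointer maximal-run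
-- extraction; same cost, alternative decomposition.


-- ===== PORT A =====
-- A's loop body and flush expression as named helpers (verbatim from A).
def flushA (start prev : Int) : String :=
  if start ≠ prev then PySem.Int.toStr start ++ "-" ++ PySem.Int.toStr prev
  else PySem.Int.toStr start

def stepA (st : List String × Int × Int) (page : Int) : List String × Int × Int :=
  let (ranges, start, prev) := st
  if page = prev + 1 then (ranges, start, page)
  else (ranges ++ [flushA start prev], page, page)

-- A: fold over pages[1:] with state (ranges, start, prev); flush the open run after the loop.
def pages_to_spec (pages : List Int) : String :=
  match pages with
  | [] => ""
  | p :: rest =>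
      let st := rest.foldl stepA ([], p, p)
      PySem.Str.join "," (st.1 ++ [flushA st.2.1 st.2.2])

-- ===== PORT B =====
-- B's inner while loop: extend the run from `prev`; returns (last element of the run, remainder).
def takeRun (prev : Int) : List Int → Int × List Int
  | [] => (prev, [])
  | x :: xs => if x = prev + 1 then takeRun x xs else (prev, x :: xs)

theorem takeRun_len (prev : Int) (xs : List Int) : (takeRun prev xs).2.length ≤ xs.length := by
  induction xs generalizing prev with
  | nil => simp [takeRun]
  | cons x xs ih =>
      simp only [takeRun]
      split
      · exact le_trans (ih x) (Nat.le_succ _)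
      · simp

-- B's outer while loop: split pages into maximal (+1)-consecutive runs as (lo, hi) pairs.
def runs : List Int → List (Int × Int)
  | [] => []
  | x :: xs =>
      let r := takeRun x xs
      (x, r.1) :: runs r.2
termination_by xs => xs.length
decreasing_by
  simpa using Nat.lt_succ_of_le (takeRun_len x xs)

def fmtRun (r : Int × Int) : String :=
  if r.1 = r.2 then PySem.Int.toStr r.1
  else PySem.Int.toStr r.1 ++ "-" ++ PySem.Int.toStr r.2

def pages_to_spec_alt (pages : List Int) : String :=
  PySem.Str.join "," ((runs pages).map fmtRun)

-- ===== PRECONDITION & SPEC =====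
def Spec_pages_to_spec (pages : List Int) (out : String) : Prop := out = pages_to_spec_alt pages
instance (pages : List Int) (out : String) : Decidable (Spec_pages_to_spec pages out) := by unfold Spec_pages_to_spec; infer_instance

-- ===== CLAIM (what is proved, stated in full; the proofs are below) =====
def Claim_equal_pages_to_spec : Prop := ∀ (pages : List Int), Dom_pages_to_spec pages → Spec_pages_to_spec pages (pages_to_spec pages)

-- ===== LEMMAS AND PROOFS =====

-- the open run (start, prev) followed by the runs of the remaining input, as A's state machine closes them
def runsAux (start prev : Int) : List Int → List (Int × Int)
  | [] => [(start, prev)]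
  | x :: xs => if x = prev + 1 then runsAux start x xs else (start, prev) :: runsAux x x xs

theorem flushA_eq_fmtRun (s pv : Int) : flushA s pv = fmtRun (s, pv) := by
  by_cases h : s = pv <;> simp [flushA, fmtRun, h]

-- A's folded state, with the trailing flush appended, is acc ++ the formatted runs of runsAux.
theorem foldA_eq_runsAux (xs : List Int) : ∀ (acc : List String) (start prev : Int),
    (xs.foldl stepA (acc, start, prev)).1
      ++ [flushA (xs.foldl stepA (acc, start, prev)).2.1 (xs.foldl stepA (acc, start, prev)).2.2]
    = acc ++ (runsAux start prev xs).map fmtRun := by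
  induction xs with
  | nil => intro acc start prev; simp [runsAux, flushA_eq_fmtRun]
  | cons x xs ih =>
      intro acc start prev
      by_cases h : x = prev + 1
      · simpa [stepA, h, runsAux] using ih acc start x
      · simp only [List.foldl_cons, stepA, runsAux, if_neg h]
        rw [ih (acc ++ [flushA start prev]) x x]
        simp [flushA_eq_fmtRun]

-- runsAux with an open run (start, prev) is (start, hi) :: runs of the rest, hi the run's end.
theorem runsAux_eq_runs (xs : List Int) : ∀ (start prev : Int),
    runsAux start prev xs = (start, (takeRun prev xs).1) :: runs (takeRun prev xs).2 := by
  induction xs with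
  | nil => intro start prev; simp [runsAux, takeRun, runs]
  | cons x xs ih =>
      intro start prev
      by_cases h : x = prev + 1
      · simp only [runsAux, takeRun, if_pos h]
        exact ih start x
      · simp only [runsAux, takeRun, if_neg h, runs]
        rw [ih x x]

-- ===== VERDICT (by name: the statement is the Claim_ definition above) =====
theorem pages_to_spec_spec : Claim_equal_pages_to_spec := by
  intro pages _
  show pages_to_spec pages = pages_to_spec_alt pages
  match pages with
  | [] => simp [pages_to_spec, pages_to_spec_alt, runs, PySem.Str.join]
  | p :: rest =>
      show PySem.Str.join "," ((rest.foldl stepA ([], p, p)).1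
          ++ [flushA (rest.foldl stepA ([], p, p)).2.1 (rest.foldl stepA ([], p, p)).2.2])
        = pages_to_spec_alt (p :: rest)
      rw [foldA_eq_runsAux rest [] p p, runsAux_eq_runs]
      simp [pages_to_spec_alt, runs]
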